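-- pv_equiv track=rewrite | github.com/namwasinyourheart/asr-deployment-app | backend/tests/test_postprocess.py | number_to_vietnamese
-- ===== SOURCE A (Python) =====
-- def number_to_vietnamese(n, zero_read="lẻ"):
--     units = ["", "một", "hai", "ba", "bốn", "năm", "sáu", "bảy", "tám", "chín"]
--     tens_words = ["", "mười", "hai mươi", "ba mươi", "bốn mươi", "năm mươi",
--                   "sáu mươi", "bảy mươi", "tám mươi", "chín mươi"]
--     scales = ["", "nghìn", "triệu", "tỷ", "nghìn tỷ", "triệu tỷ", "tỷ tỷ"]
--
--     def read_three_digits(num, is_first_group=False):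
--         hundred = num // 100
--         ten = (num % 100) // 10
--         one = num % 10
--         result = []
--
--         # Hàng trăm
--         if hundred > 0:
--             result.append(units[hundred] + " trăm")
--         elif not is_first_group and num != 0:
--             result.append("không trăm")
--
--         # Hàng chục
--         if ten > 1:
--             result.append(tens_words[ten])
--         elif ten == 1:
--             result.append("mười")
--         elif ten == 0 and one > 0 and (hundred > 0 or not is_first_group):
--             result.append(zero_read)
--
--         # Hàng đơn vị
--         if one > 0:
--             if ten == 0 or ten == 1:
--                 if one == 5 and ten > 0:
--                     result.append("lăm")
--                 else:
--                     result.append(units[one])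
--             else:
--                 if one == 1:
--                     result.append("mốt")
--                 elif one == 4:
--                     result.append("tư")
--                 elif one == 5:
--                     result.append("lăm")
--                 else:
--                     result.append(units[one])
--
--         return " ".join(result)
--
--     if n == 0:
--         return "không"
--
--     # Chia số thành các nhóm 3 chữ số
--     str_n = str(n)
--     groups = []
--     while str_n:
--         groups.insert(0, int(str_n[-3:]))
--         str_n = str_n[:-3]
--
--     words = []
--     group_len = len(groups)
--     for idx, g in enumerate(groups):
--         is_first_group = (idx == 0)
--         # Nếu nhóm ≠ 0 hoặc nằm giữa các nhóm còn số khác thì mới đọc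
--         has_nonzero_after = any(groups[idx + 1:]) if idx + 1 < group_len else False
--         if g != 0 or has_nonzero_after:
--             group_words = read_three_digits(g, is_first_group)
--             if group_words:
--                 words.append(group_words)
--             scale = scales[group_len - idx - 1]
--             if scale and (g != 0 or has_nonzero_after):
--                 words.append(scale)
--
--     return " ".join(words).strip()
-- ===== SOURCE B (Python) =====
-- def number_to_vietnamese(n, zero_read="lẻ"):
--     units = ["", "một", "hai", "ba", "bốn", "năm", "sáu", "bảy", "tám", "chín"]
--     tens_words = ["", "mười", "hai mươi", "ba mươi", "bốn mươi", "năm mươi",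
--                   "sáu mươi", "bảy mươi", "tám mươi", "chín mươi"]
--     scales = ["", "nghìn", "triệu", "tỷ", "nghìn tỷ", "triệu tỷ", "tỷ tỷ"]
--
--     def read_three_digits(num, is_first_group=False):
--         hundred = num // 100
--         ten = (num % 100) // 10
--         one = num % 10
--         result = []
--         if hundred > 0:
--             result.append(units[hundred] + " trăm")
--         elif not is_first_group and num != 0:
--             result.append("không trăm")
--         if ten > 1:
--             result.append(tens_words[ten])
--         elif ten == 1:
--             result.append("mười")
--         elif ten == 0 and one > 0 and (hundred > 0 or not is_first_group):
--             result.append(zero_read)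
--         if one > 0:
--             if ten == 0 or ten == 1:
--                 if one == 5 and ten > 0:
--                     result.append("lăm")
--                 else:
--                     result.append(units[one])
--             else:
--                 if one == 1:
--                     result.append("mốt")
--                 elif one == 4:
--                     result.append("tư")
--                 elif one == 5:
--                     result.append("lăm")
--                 else:
--                     result.append(units[one])
--         return " ".join(result)
--
--     if n == 0:
--         return "không"
--
--     # Recurse over powers of 1000: read the higher part first, then this group.
--     # k = scale index of the lowest group of m; lower_nonzero = some stripped lower group != 0.
--     def go(m, k, lower_nonzero):
--         g = m % 1000
--         if m >= 1000:
--             parts = go(m // 1000, k + 1, lower_nonzero or g != 0)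
--             is_first = False
--         else:
--             parts = []
--             is_first = True
--         if g != 0 or lower_nonzero:
--             gw = read_three_digits(g, is_first)
--             if gw:
--                 parts.append(gw)
--             if k > 0:
--                 parts.append(scales[k])
--         return parts
--
--     return " ".join(go(n, 0, False)).strip()
-- ===== Notes on version B (the rewrite author's own statement) =====
-- stated objective: alternative
-- what changed: B replaces A's str(n)-based right-to-left group splitting plus an indexed loop with any(groups[idx+1:]) scans by a direct recursion over powers of 1000 that reads n // 1000 first and threads the scale index and a 'lower groups nonzero' flag through the recursion; the leaf helper read_three_digits is kept as-is.
-- outside the precondition, e.g. on number_to_vietnamese(-5, 'le'): A returns 'chín mươi lăm', B returns 'chín trăm chín mươi lăm'; on number_to_vietnamese(-234, 'le'): A raises ValueError, B returns 'bảy trăm sáu mươi sáu'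
import Mathlib
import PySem

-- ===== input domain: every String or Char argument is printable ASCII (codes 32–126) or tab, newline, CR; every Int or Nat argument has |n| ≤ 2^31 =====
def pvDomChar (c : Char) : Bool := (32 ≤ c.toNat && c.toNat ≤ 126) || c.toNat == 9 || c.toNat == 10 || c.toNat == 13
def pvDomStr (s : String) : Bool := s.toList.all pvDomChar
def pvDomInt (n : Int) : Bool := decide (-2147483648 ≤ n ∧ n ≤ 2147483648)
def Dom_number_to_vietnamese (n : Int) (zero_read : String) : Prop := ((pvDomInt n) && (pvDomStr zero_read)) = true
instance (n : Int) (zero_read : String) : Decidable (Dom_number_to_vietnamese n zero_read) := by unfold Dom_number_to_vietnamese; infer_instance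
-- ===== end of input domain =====

-- B replaces A's string-split group list and indexed loop by direct recursion over powers of 1000
-- (same leaf helper read_three_digits); objective: alternative decomposition, same cost.

-- ===== PORT A =====
def unitsV : List String := ["", "một", "hai", "ba", "bốn", "năm", "sáu", "bảy", "tám", "chín"]
def tensV : List String := ["", "mười", "hai mươi", "ba mươi", "bốn mươi", "năm mươi",
                            "sáu mươi", "bảy mươi", "tám mươi", "chín mươi"]
def scalesV : List String := ["", "nghìn", "triệu", "tỷ", "nghìn tỷ", "triệu tỷ", "tỷ tỷ"]

-- shared leaf helper read_three_digits (identical in Source A and Source B)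
def readThreeDigits (zero_read : String) (num : Int) (isFirstGroup : Bool) : String :=
  let hundred := PySem.Int.floordiv num 100
  let ten := PySem.Int.floordiv (PySem.Int.mod num 100) 10
  let one := PySem.Int.mod num 10
  let result : List String := []
  let result := if hundred > 0 then result ++ [((PySem.List.pyGet? unitsV hundred).getD "") ++ " trăm"]
    else if ¬ isFirstGroup = true ∧ num ≠ 0 then result ++ ["không trăm"] else result
  let result := if ten > 1 then result ++ [(PySem.List.pyGet? tensV ten).getD ""]
    else if ten = 1 then result ++ ["mười"]
    else if ten = 0 ∧ one > 0 ∧ (hundred > 0 ∨ ¬ isFirstGroup = true) then result ++ [zero_read]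
    else result
  let result := if one > 0 then
      (if ten = 0 ∨ ten = 1 then
        (if one = 5 ∧ ten > 0 then result ++ ["lăm"]
         else result ++ [(PySem.List.pyGet? unitsV one).getD ""])
      else
        (if one = 1 then result ++ ["mốt"]
         else if one = 4 then result ++ ["tư"]
         else if one = 5 then result ++ ["lăm"]
         else result ++ [(PySem.List.pyGet? unitsV one).getD ""]))
    else result
  PySem.Str.join " " result

-- the `while str_n:` group-splitting loop (int(...) can only fail outside Pre_, where A raises; getD 0 is never reached under Pre_)
def splitGroupsA (s : List Char) (groups : List Int) : List Int :=
  if h : s = [] then groups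
  else splitGroupsA (PySem.List.slice s none (some (-3)))
        (((PySem.Int.ofChars? (PySem.List.slice s (some (-3)) none)).getD 0) :: groups)
termination_by s.length
decreasing_by
  rw [PySem.List.slice_to_neg_ofNat s 3 (by omega)]
  have : 0 < s.length := List.length_pos_iff.mpr h
  simp only [List.length_take]; omega

-- body of `for idx, g in enumerate(groups):`
def wordsStepA (zero_read : String) (groups : List Int) (groupLen : Int)
    (words : List String) (idxg : Int × Int) : List String :=
  let idx := idxg.1
  let g := idxg.2
  let isFirstGroup : Bool := decide (idx = 0)
  let hasNonzeroAfter : Bool :=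
    if idx + 1 < groupLen then (PySem.List.slice groups (some (idx + 1)) none).any (fun x => decide (x ≠ 0))
    else false
  if g ≠ 0 ∨ hasNonzeroAfter = true then
    let groupWords := readThreeDigits zero_read g isFirstGroup
    let words := if groupWords ≠ "" then words ++ [groupWords] else words
    let scale := (PySem.List.pyGet? scalesV (groupLen - idx - 1)).getD ""
    if scale ≠ "" ∧ (g ≠ 0 ∨ hasNonzeroAfter = true) then words ++ [scale] else words
  else words

def number_to_vietnamese (n : Int) (zero_read : String) : String :=
  if n = 0 then "không"
  else
    let strN := PySem.Int.toChars n
    let groups := splitGroupsA strN []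
    let groupLen : Int := (groups.length : Int)
    let words := (PySem.List.enumerate groups).foldl (wordsStepA zero_read groups groupLen) []
    PySem.Str.strip (PySem.Str.join " " words)

-- ===== PORT B =====
-- recursion over powers of 1000: read n // 1000 first, then this group and its scale word;
-- k = scale index of the lowest group of m, lowerNonzero = some stripped lower group ≠ 0
def goB (zero_read : String) (m : Int) (k : Int) (lowerNonzero : Bool) : List String :=
  let g := PySem.Int.mod m 1000
  let finish := fun (parts : List String) (isFirst : Bool) =>
    if g ≠ 0 ∨ lowerNonzero = true then
      let gw := readThreeDigits zero_read g isFirst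
      let parts := if gw ≠ "" then parts ++ [gw] else parts
      if 0 < k then parts ++ [(PySem.List.pyGet? scalesV k).getD ""] else parts
    else parts
  if 1000 ≤ m then
    finish (goB zero_read (PySem.Int.floordiv m 1000) (k + 1)
             (lowerNonzero || decide (g ≠ 0))) false
  else finish [] true
termination_by m.toNat
decreasing_by
  rename_i h
  rw [PySem.Int.floordiv_eq_ediv_of_pos (by omega)]
  omega

def number_to_vietnamese_alt (n : Int) (zero_read : String) : String :=
  if n = 0 then "không"
  else PySem.Str.strip (PySem.Str.join " " (goB zero_read n 0 false))

-- ===== PRECONDITION & SPEC =====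
-- Pre_ excludes negative n, on which A either raises ValueError (when |n| has a digit count
-- divisible by 3, int("-") fails) or returns an accidental reading produced by slicing the sign
-- character into a group (e.g. A reads -5 as "chín mươi lăm", i.e. 95).
def Pre_number_to_vietnamese (n : Int) (zero_read : String) : Prop := 0 ≤ n
instance (n : Int) (zero_read : String) : Decidable (Pre_number_to_vietnamese n zero_read) := by
  unfold Pre_number_to_vietnamese; infer_instance

def pvWitness_number_to_vietnamese : Int × String := (1000005, "le")

def Spec_number_to_vietnamese (n : Int) (zero_read : String) (out : String) : Prop :=
  out = number_to_vietnamese_alt n zero_read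
instance (n : Int) (zero_read : String) (out : String) : Decidable (Spec_number_to_vietnamese n zero_read out) := by
  unfold Spec_number_to_vietnamese; infer_instance

-- ===== CLAIM (what is proved, stated in full; the proofs are below) =====
def Claim_equal_number_to_vietnamese : Prop := ∀ (n : Int) (zero_read : String), Dom_number_to_vietnamese n zero_read → Pre_number_to_vietnamese n zero_read → Spec_number_to_vietnamese n zero_read (number_to_vietnamese n zero_read)


-- ===== LEMMAS AND PROOFS =====

-- numeric view of A's group list: base-1000 groups of m, most significant first
def groupsN (m : Nat) : List Int :=
  if m < 1000 then [(m : Int)]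
  else groupsN (m / 1000) ++ [((m % 1000 : Nat) : Int)]

lemma groupsN_ne_nil (m : Nat) : groupsN m ≠ [] := by
  rw [groupsN]; split <;> simp

-- suffix view of A's word loop, generalised by a scale offset k0 and an extra
-- "some group strictly below this suffix is nonzero" flag (both 0/false for the whole list)
def wordsG (zero_read : String) : List Int → Bool → Int → Bool → List String
  | [], _, _, _ => []
  | g :: rest, isFirst, k0, extra =>
    let hasAfter := rest.any (fun x => decide (x ≠ 0)) || extra
    (if g ≠ 0 ∨ hasAfter = true then
       (let gw := readThreeDigits zero_read g isFirst
        (if gw ≠ "" then [gw] else []) ++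
        (let sc := (PySem.List.pyGet? scalesV ((rest.length : Int) + k0)).getD ""
         if sc ≠ "" ∧ (g ≠ 0 ∨ hasAfter = true) then [sc] else []))
     else []) ++ wordsG zero_read rest false k0 extra

lemma toDigitsCore_eq (f : Nat) : ∀ (m : Nat) (acc : List Char), 0 < m → m < f →
    Nat.toDigitsCore 10 f m acc = ((Nat.digits 10 m).map Nat.digitChar).reverse ++ acc := by
  induction f with
  | zero => intro m acc h1 h2; omega
  | succ f ih =>
    intro m acc h1 h2
    rw [Nat.toDigitsCore]
    by_cases h : m / 10 = 0
    · have hm : m < 10 := by omega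
      rw [Nat.digits_def' (by norm_num : 1 < 10) h1, h, Nat.digits_zero]
      simp [h, Nat.mod_eq_of_lt hm]
    · rw [if_neg h]
      rw [ih (m / 10) _ (by omega) (by omega)]
      rw [Nat.digits_def' (by norm_num : 1 < 10) h1]
      simp

lemma toChars_eq (m : Nat) (hm : 0 < m) :
    PySem.Int.toChars (m : Int) = ((Nat.digits 10 m).map Nat.digitChar).reverse := by
  rw [PySem.Int.toChars]
  rw [if_neg (by omega)]
  rw [Nat.toDigits, Int.toNat_natCast]
  rw [toDigitsCore_eq (m+1) m [] hm (by omega)]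
  simp

lemma parse1 : ∀ a < 10, 0 < a → PySem.Int.ofChars? [Nat.digitChar a] = some (a : Int) := by decide

set_option maxRecDepth 40000 in
lemma parse2 : ∀ a < 10, ∀ b < 10, 0 < a →
    PySem.Int.ofChars? [Nat.digitChar a, Nat.digitChar b] = some ((10 * a + b : Nat) : Int) := by decide

set_option maxRecDepth 40000 in
lemma parse3 : ∀ a < 10, ∀ b < 10, ∀ c < 10,
    PySem.Int.ofChars? [Nat.digitChar a, Nat.digitChar b, Nat.digitChar c]
      = some ((100 * a + 10 * b + c : Nat) : Int) := by decide

lemma parse_small (m : Nat) (h1 : 0 < m) (h2 : m < 1000) :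
    PySem.Int.ofChars? (((Nat.digits 10 m).map Nat.digitChar).reverse) = some (m : Int) := by
  rw [Nat.digits_def' (by norm_num : 1 < 10) h1]
  by_cases ha : m / 10 = 0
  · rw [ha, Nat.digits_zero]
    simpa [Nat.mod_eq_of_lt (by omega : m < 10)] using parse1 m (by omega) h1
  rw [Nat.digits_def' (by norm_num : 1 < 10) (by omega)]
  by_cases hb : m / 10 / 10 = 0
  · rw [hb, Nat.digits_zero]
    have := parse2 (m / 10) (by omega) (m % 10) (by omega) (by omega)
    simp only [List.map_cons, List.map_nil, List.reverse_cons, List.reverse_nil, List.nil_append,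
      List.cons_append] at this ⊢
    rw [Nat.mod_eq_of_lt (by omega : m / 10 < 10)]
    rw [this]
    congr 1; congr 1; omega
  · rw [Nat.digits_def' (by norm_num : 1 < 10) (by omega)]
    have h0 : m / 10 / 10 / 10 = 0 := by omega
    rw [h0, Nat.digits_zero]
    have := parse3 (m / 10 / 10) (by omega) (m / 10 % 10) (by omega) (m % 10) (by omega)
    simp only [List.map_cons, List.map_nil, List.reverse_cons, List.reverse_nil, List.nil_append,
      List.cons_append] at this ⊢
    rw [Nat.mod_eq_of_lt (by omega : m / 10 / 10 < 10)]
    rw [this]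
    congr 1; congr 1; omega

lemma digits_drop3 (m : Nat) : (Nat.digits 10 m).drop 3 = Nat.digits 10 (m / 1000) := by
  rcases Nat.eq_zero_or_pos m with h | h
  · simp [h]
  rw [Nat.digits_def' (by norm_num : 1 < 10) h]
  rcases Nat.eq_zero_or_pos (m / 10) with h2 | h2
  · have : m / 1000 = 0 := by omega
    simp [h2, this]
  rw [Nat.digits_def' (by norm_num : 1 < 10) h2]
  rcases Nat.eq_zero_or_pos (m / 10 / 10) with h3 | h3
  · have : m / 1000 = 0 := by omega
    simp [h3, this]
  rw [Nat.digits_def' (by norm_num : 1 < 10) h3]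
  have : m / 10 / 10 / 10 = m / 1000 := by omega
  simp [this]

lemma split_eq (m : Nat) (hm : 0 < m) : ∀ acc : List Int,
    splitGroupsA (((Nat.digits 10 m).map Nat.digitChar).reverse) acc = groupsN m ++ acc := by
  induction m using Nat.strong_induction_on with
  | _ m ih =>
  intro acc
  have hm' : 0 < m := hm
  have hnil : ((Nat.digits 10 m).map Nat.digitChar).reverse ≠ [] := by
    simp [Nat.digits_ne_nil_iff_ne_zero]; omega
  rw [splitGroupsA, dif_neg hnil]
  rw [PySem.List.slice_from_neg_ofNat _ 3 (by omega), PySem.List.slice_to_neg_ofNat _ 3 (by omega)]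
  have hlen : ((Nat.digits 10 m).map Nat.digitChar).reverse.length = (Nat.digits 10 m).length := by simp
  by_cases hsmall : m < 1000
  · have hle : (Nat.digits 10 m).length ≤ 3 := (Nat.digits_length_le_iff (by norm_num) m).mpr (by norm_num; omega)
    rw [hlen]
    have h0 : (Nat.digits 10 m).length - 3 = 0 := by omega
    rw [h0, List.drop_zero, List.take_zero]
    rw [parse_small m hm hsmall]
    rw [splitGroupsA]
    simp [groupsN, hsmall]
  · have hgt : 3 < (Nat.digits 10 m).length := by
      by_contra h
      exact hsmall (by have := (Nat.digits_length_le_iff (b:=10) (k:=3) (by norm_num) m).mp (by omega); norm_num at this; omega)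
    rw [hlen]
    -- the dropped tail chunk: last three characters = three lowest digits
    rw [List.drop_reverse, List.take_reverse]
    have hlm : (List.map Nat.digitChar (Nat.digits 10 m)).length = (Nat.digits 10 m).length := by simp
    rw [hlm]
    have h3 : (Nat.digits 10 m).length - ((Nat.digits 10 m).length - 3) = 3 := by omega
    rw [h3]
    have hm10 : 0 < m / 10 := by omega
    have hm100 : 0 < m / 10 / 10 := by omega
    have hd : Nat.digits 10 m = m % 10 :: (m / 10) % 10 :: (m / 10 / 10) % 10 :: Nat.digits 10 (m / 10 / 10 / 10) := by
      rw [Nat.digits_def' (by norm_num : 1 < 10) hm, Nat.digits_def' (by norm_num : 1 < 10) hm10,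
          Nat.digits_def' (by norm_num : 1 < 10) hm100]
    rw [hd]
    simp only [List.take_succ_cons, List.take_zero, List.map_cons, List.map_nil, List.reverse_cons,
      List.reverse_nil, List.nil_append, List.cons_append, List.drop_succ_cons, List.drop_zero]
    rw [parse3 (m / 10 / 10 % 10) (by omega) (m / 10 % 10) (by omega) (m % 10) (by omega)]
    have hdrop : List.map Nat.digitChar (Nat.digits 10 (m / 10 / 10 / 10)) 
        = List.map Nat.digitChar (Nat.digits 10 (m / 1000)) := by
      have := digits_drop3 m
      rw [hd] at this
      simp only [List.drop_succ_cons, List.drop_zero] at this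
      rw [this]
    rw [hdrop]
    have hv : ((100 * (m / 10 / 10 % 10) + 10 * (m / 10 % 10) + m % 10 : Nat) : Int) = ((m % 1000 : Nat) : Int) := by
      congr 1; omega
    rw [hv, Option.getD_some]
    rw [ih (m / 1000) (by omega) (by omega) _]
    conv_rhs => rw [groupsN, if_neg hsmall]
    simp

lemma fold_eq (zero_read : String) (G : List Int) : ∀ (suffix : List Int) (i : Nat) (acc : List String),
    G.drop i = suffix →
    (PySem.List.enumerate suffix (i : Int)).foldl (wordsStepA zero_read G (G.length : Int)) acc
      = acc ++ wordsG zero_read suffix (decide (i = 0)) 0 false := by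
  intro suffix
  induction suffix with
  | nil => intro i acc h; simp [PySem.List.enumerate, wordsG]
  | cons g rest ih =>
    intro i acc hdrop
    have hi : i < G.length := by
      have := congrArg List.length hdrop
      simp at this; omega
    have hdrop1 : G.drop (i + 1) = rest := by
      have : G.drop (i + 1) = (G.drop i).tail := by
        rw [← List.drop_drop]; simp
      rw [this, hdrop]; rfl
    have hlen : G.length = i + 1 + rest.length := by
      have := congrArg List.length hdrop
      simp at this; omega
    simp only [PySem.List.enumerate, List.foldl_cons]
    have hcast : ((i : Int) + 1) = ((i + 1 : Nat) : Int) := by push_cast; ring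
    rw [hcast, ih (i + 1) _ hdrop1]
    have hstep : wordsStepA zero_read G (G.length : Int) acc ((i : Int), g)
        = acc ++ (let hasAfter := rest.any (fun x => decide (x ≠ 0)) || false
          (if g ≠ 0 ∨ hasAfter = true then
            (let gw := readThreeDigits zero_read g (decide (i = 0))
             (if gw ≠ "" then [gw] else []) ++
             (let sc := (PySem.List.pyGet? scalesV ((rest.length : Int) + 0)).getD ""
              if sc ≠ "" ∧ (g ≠ 0 ∨ hasAfter = true) then [sc] else []))
          else [])) := by
      have hslice : PySem.List.slice G (some ((i : Int) + 1)) none = rest := by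
        rw [hcast, PySem.List.slice_from_natCast, hdrop1]
      have hfirst : decide ((i : Int) = 0) = decide (i = 0) := by
        by_cases h : i = 0 <;> simp [h] <;> omega
      have hscale : (G.length : Int) - (i : Int) - 1 = (rest.length : Int) + 0 := by
        push_cast; omega
      simp only [wordsStepA, hslice, hfirst, hscale]
      by_cases hguard : (i : Int) + 1 < (G.length : Int)
      · rw [if_pos hguard]
        simp only [Bool.or_false, Bool.false_eq_true, or_false]
        split_ifs <;> first | simp | tauto
      · rw [if_neg hguard]
        have hrest : rest = [] := by
          rcases rest with _ | ⟨x, xs⟩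
          · rfl
          · exfalso; apply hguard; push_cast; simp at hlen; omega
        subst hrest
        simp only [List.any_nil, Bool.or_false, Bool.false_eq_true, or_false]
        split_ifs <;> first | simp | tauto
    rw [hstep]
    have hfalse : decide (i + 1 = 0) = false := by simp
    rw [hfalse]
    conv_rhs => rw [wordsG]
    simp

lemma wordsG_append (zero_read : String) (g : Int) (k0 : Int) (extra : Bool) :
    ∀ (Gs : List Int) (isFirst : Bool),
    wordsG zero_read (Gs ++ [g]) isFirst k0 extra
      = wordsG zero_read Gs isFirst (k0 + 1) (decide (g ≠ 0) || extra)
        ++ wordsG zero_read [g] (if Gs = [] then isFirst else false) k0 extra := by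
  intro Gs
  induction Gs with
  | nil => intro isFirst; simp [wordsG]
  | cons a Gs ih =>
    intro isFirst
    rw [List.cons_append, wordsG]
    conv_rhs => rw [wordsG]
    rw [ih false]
    have hany : ((Gs ++ [g]).any (fun x => decide (x ≠ 0)) || extra)
        = (Gs.any (fun x => decide (x ≠ 0)) || (decide (g ≠ 0) || extra)) := by
      simp [List.any_append, Bool.or_assoc]
    have hlen : ((Gs ++ [g]).length : Int) + k0 = (Gs.length : Int) + (k0 + 1) := by
      simp; ring
    simp only [hany, hlen, if_neg (List.cons_ne_nil a Gs)]
    simp [List.append_assoc, or_assoc]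

lemma scalesV_ne_empty (k : Nat) (h1 : 0 < k) (h6 : k ≤ 6) :
    (PySem.List.pyGet? scalesV (k : Int)).getD "" ≠ "" := by
  interval_cases k <;> decide

lemma go_eq (zero_read : String) : ∀ (m : Nat), 0 < m → ∀ (k : Nat) (extra : Bool),
    m < 1000 ^ (7 - k) →
    goB zero_read (m : Int) (k : Int) extra = wordsG zero_read (groupsN m) true (k : Int) extra := by
  intro m
  induction m using Nat.strong_induction_on with
  | _ m ih =>
  intro hm k extra hbound
  have hk6 : k ≤ 6 := by
    by_contra h
    have : 7 - k = 0 := by omega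
    rw [this, pow_zero] at hbound; omega
  have hg : PySem.Int.mod (m : Int) 1000 = ((m % 1000 : Nat) : Int) := by
    exact_mod_cast PySem.Int.mod_natCast m 1000
  -- the trailing-group emission: `finish parts isFirst` equals parts ++ wordsG [g'] isFirst k extra
  have hfinish : ∀ (X : List String) (isF : Bool) (g' : Nat), g' < 1000 →
      (if ((g' : Int) ≠ 0 ∨ extra = true) then
        (let gw := readThreeDigits zero_read (g' : Int) isF
         let parts := if gw ≠ "" then X ++ [gw] else X
         if 0 < (k : Int) then parts ++ [(PySem.List.pyGet? scalesV (k : Int)).getD ""] else parts)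
       else X)
      = X ++ wordsG zero_read [(g' : Int)] isF (k : Int) extra := by
    intro X isF g' _
    rw [wordsG]
    simp only [List.any_nil, Bool.false_or, List.length_nil, Nat.cast_zero, zero_add, wordsG,
      List.append_nil]
    by_cases hcond : ((g' : Int) ≠ 0 ∨ extra = true)
    · rw [if_pos hcond, if_pos hcond]
      by_cases hk : k = 0
      · subst hk
        rw [if_neg (by omega)]
        have hsc : (PySem.List.pyGet? scalesV ((0:Nat) : Int)).getD "" = "" := by decide
        rw [hsc]
        split_ifs <;> simp_all
      · rw [if_pos (by push_cast; omega)]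
        have hscne := scalesV_ne_empty k (by omega) hk6
        rw [if_pos (And.intro hscne hcond)]
        split_ifs <;> first | simp | tauto
    · rw [if_neg hcond, if_neg hcond]
      simp
  by_cases hsmall : m < 1000
  · conv_lhs => rw [goB]
    rw [if_neg (by push_cast; omega)]
    simp only [hg]
    rw [groupsN, if_pos hsmall]
    have hmod : m % 1000 = m := Nat.mod_eq_of_lt hsmall
    rw [hmod]
    have := hfinish [] true m hsmall
    simpa using this
  · conv_lhs => rw [goB]
    rw [if_pos (by push_cast; omega)]
    simp only [hg]
    have hfd : PySem.Int.floordiv (m : Int) 1000 = ((m / 1000 : Nat) : Int) := by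
      exact_mod_cast PySem.Int.floordiv_natCast m 1000
    have hcast1 : (k : Int) + 1 = ((k + 1 : Nat) : Int) := by push_cast; ring
    rw [hfd, hcast1]
    have hb2 : 2 ≤ 7 - k := by
      by_contra h
      have h1 : 7 - k ≤ 1 := by omega
      have : (1000:Nat) ^ (7 - k) ≤ 1000 ^ 1 := Nat.pow_le_pow_right (by omega) h1
      simp at this; omega
    have hbound' : m / 1000 < 1000 ^ (7 - (k + 1)) := by
      rw [Nat.div_lt_iff_lt_mul (by omega)]
      have : 1000 ^ (7 - (k + 1)) * 1000 = 1000 ^ (7 - k) := by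
        rw [← pow_succ]
        congr 1
        omega
      rw [this]; exact hbound
    rw [ih (m / 1000) (by omega) (by omega) (k + 1) (extra || decide (((m % 1000 : Nat) : Int) ≠ 0)) hbound']
    conv_rhs => rw [groupsN, if_neg hsmall]
    rw [wordsG_append zero_read _ (k : Int) extra (groupsN (m / 1000)) true]
    rw [if_neg (groupsN_ne_nil (m / 1000))]
    have hor : (extra || decide (((m % 1000 : Nat) : Int) ≠ 0))
        = (decide (((m % 1000 : Nat) : Int) ≠ 0) || extra) := Bool.or_comm _ _
    rw [hor]
    rw [← hcast1]
    have := hfinish (wordsG zero_read (groupsN (m / 1000)) true ((k : Int) + 1)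
      (decide (((m % 1000 : Nat) : Int) ≠ 0) || extra)) false (m % 1000) (by omega)
    simpa using this

-- ===== VERDICT (by name: the statement is the Claim_ definition above) =====
theorem number_to_vietnamese_spec : Claim_equal_number_to_vietnamese := by
  intro n zero_read hdom hpre
  show number_to_vietnamese n zero_read = number_to_vietnamese_alt n zero_read
  by_cases hn : n = 0
  · subst hn; rfl
  · have hpre' : (0 : Int) ≤ n := hpre
    obtain ⟨m, rfl⟩ : ∃ m : Nat, n = (m : Int) := ⟨n.toNat, (Int.toNat_of_nonneg hpre').symm⟩
    have hm : 0 < m := by omega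
    have hdom' : (m : Int) ≤ 2147483648 := by
      simp [Dom_number_to_vietnamese, pvDomInt] at hdom
      omega
    have hbound : m < 1000 ^ 7 := by
      norm_num
      omega
    have hA : number_to_vietnamese (m : Int) zero_read
        = PySem.Str.strip (PySem.Str.join " " (wordsG zero_read (groupsN m) true 0 false)) := by
      rw [number_to_vietnamese, if_neg hn]
      simp only [toChars_eq m hm, split_eq m hm [], List.append_nil]
      have hfold := fold_eq zero_read (groupsN m) (groupsN m) 0 [] (by simp)
      simp only [Nat.cast_zero, decide_true] at hfold
      rw [hfold]
      simp
    have hB : number_to_vietnamese_alt (m : Int) zero_read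
        = PySem.Str.strip (PySem.Str.join " " (wordsG zero_read (groupsN m) true 0 false)) := by
      rw [number_to_vietnamese_alt, if_neg hn]
      have hgo := go_eq zero_read m hm 0 false (by simpa using hbound)
      simp only [Nat.cast_zero] at hgo
      rw [hgo]
    rw [hA, hB]
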